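-- pv_equiv track=rewrite | github.com/wp1325/Chimp | Chimp/utils.py | find_max_leq
-- ===== SOURCE A (Python) =====
-- def find_max_leq(target, nums):
--     max_val = None
--     index = -1
--
--     for i, val in enumerate(nums):
--         if val <= target:
--             if max_val is None or val > max_val:
--                 max_val = val
--                 index = i
--
--     return max_val, index
-- ===== SOURCE B (Python) =====
-- def find_max_leq(target, nums):
--     candidates = [v for v in nums if v <= target]
--     if not candidates:
--         return None, -1
--     m = max(candidates)
--     return m, nums.index(m)
-- ===== Notes on version B (the rewrite author's own statement) =====
-- stated objective: simpler
-- what changed: Replaces A's single pass that tracks a (max_val, index) pair with two staged passes: filter values <= target, take their plain max, then look the index up afterwards with nums.index(m), which yields the first occurrence and thus A's strict-> tie-break.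
import Mathlib
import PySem

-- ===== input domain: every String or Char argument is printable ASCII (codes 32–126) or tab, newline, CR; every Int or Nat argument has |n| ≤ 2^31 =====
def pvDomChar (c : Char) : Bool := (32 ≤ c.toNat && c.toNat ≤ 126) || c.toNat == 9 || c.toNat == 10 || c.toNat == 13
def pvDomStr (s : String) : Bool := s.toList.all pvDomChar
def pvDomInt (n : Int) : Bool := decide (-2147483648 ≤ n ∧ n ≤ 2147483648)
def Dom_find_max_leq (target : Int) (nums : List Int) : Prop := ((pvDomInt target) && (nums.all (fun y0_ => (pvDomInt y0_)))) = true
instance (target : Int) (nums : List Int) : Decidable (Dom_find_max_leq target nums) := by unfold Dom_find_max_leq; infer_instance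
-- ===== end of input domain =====

-- B replaces A's single tracking pass by two staged passes — plain max of the
-- filtered values, then a separate first-index lookup (objective: simpler).


-- ===== PORT A =====
-- for i, val in enumerate(nums): if val <= target: if max_val is None or val > max_val: update
def find_max_leq (target : Int) (nums : List Int) : Option Int × Int :=
  (PySem.List.enumerate nums).foldl
    (fun (st : Option Int × Int) p =>
      if p.2 ≤ target then
        match st.1 with
        | none => (some p.2, p.1)
        | some m => if m < p.2 then (some p.2, p.1) else st
      else st)
    (none, -1)

-- ===== PORT B =====
-- candidates = [v for v in nums if v <= target]; m = max(candidates); return m, nums.index(m)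
-- (nums.index(m) never raises here since m is taken from nums; the `none` branch is unreachable)
def find_max_leq_alt (target : Int) (nums : List Int) : Option Int × Int :=
  let candidates := nums.filter (fun v => v ≤ target)
  match PySem.List.max? candidates (fun v => v) with
  | none => (none, -1)
  | some m =>
    match PySem.List.index? nums m with
    | some i => (some m, (i : Int))
    | none => (none, -1)

-- ===== PRECONDITION & SPEC =====
def Spec_find_max_leq (target : Int) (nums : List Int) (out : Option Int × Int) : Prop := out = find_max_leq_alt target nums
instance (target : Int) (nums : List Int) (out : Option Int × Int) : Decidable (Spec_find_max_leq target nums out) := by unfold Spec_find_max_leq; infer_instance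

-- ===== CLAIM (what is proved, stated in full; the proofs are below) =====
def Claim_equal_find_max_leq : Prop := ∀ (target : Int) (nums : List Int), Dom_find_max_leq target nums → Spec_find_max_leq target nums (find_max_leq target nums)

-- ===== LEMMAS AND PROOFS =====

-- A's fold step
def pvStepA (target : Int) (st : Option Int × Int) (p : Int × Int) : Option Int × Int :=
  if p.2 ≤ target then
    match st.1 with
    | none => (some p.2, p.1)
    | some m => if m < p.2 then (some p.2, p.1) else st
  else st

theorem pvA_eq_fold (target : Int) (nums : List Int) :
    find_max_leq target nums
      = (PySem.List.enumerate nums).foldl (pvStepA target) (none, -1) := by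
  rfl

-- max? with identity key as a foldl
def pvMaxStep (acc : Option Int) (x : Int) : Option Int :=
  match acc with
  | none => some x
  | some m => if m < x then some x else some m

theorem pvMax?_eq_foldl (l : List Int) :
    PySem.List.max? l (fun v => v) = l.foldl pvMaxStep none := by
  unfold PySem.List.max?
  congr 1
  funext acc x
  cases acc with
  | none => rfl
  | some m => rfl

theorem pvMaxStep_append (l : List Int) (x : Int) :
    (l ++ [x]).foldl pvMaxStep none
      = pvMaxStep (l.foldl pvMaxStep none) x := by
  rw [List.foldl_append]; rfl

-- main induction, back to front
theorem pvMain (target : Int) (nums : List Int) :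
    find_max_leq target nums = find_max_leq_alt target nums := by
  induction nums using List.reverseRecOn with
  | nil => rfl
  | append_singleton l x ih =>
    rw [pvA_eq_fold] at *
    rw [PySem.List.enumerate_append, List.foldl_append, ih]
    simp only [find_max_leq_alt, pvMax?_eq_foldl, List.filter_append, List.filter_cons,
      List.filter_nil]
    by_cases hx : x ≤ target
    · simp only [hx, decide_true, if_true, pvMaxStep_append]
      cases hC : (List.filter (fun v => decide (v ≤ target)) l).foldl pvMaxStep none with
      | none =>
        have hCmax : PySem.List.max? (List.filter (fun v => decide (v ≤ target)) l) (fun v => v) = none := by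
          rw [pvMax?_eq_foldl, hC]
        have hCempty : List.filter (fun v => decide (v ≤ target)) l = [] :=
          (PySem.List.max?_eq_none_iff _ _).1 hCmax
        have hxnot : x ∉ l := by
          intro hmem
          have : x ∈ List.filter (fun v => decide (v ≤ target)) l :=
            List.mem_filter.2 ⟨hmem, by simpa using hx⟩
          simp [hCempty] at this
        have hA := PySem.List.index?_append_singleton_self l x hxnot
        simp only [PySem.List.index?_eq_idxOf?] at hA ⊢
        simp [PySem.List.enumerate, pvStepA, pvMaxStep, hx, hA]
      | some m =>
        have hCmax : PySem.List.max? (List.filter (fun v => decide (v ≤ target)) l) (fun v => v) = some m := by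
          rw [pvMax?_eq_foldl, hC]
        have hmC : m ∈ List.filter (fun v => decide (v ≤ target)) l :=
          PySem.List.max?_mem hCmax
        have hml : m ∈ l := (List.mem_filter.1 hmC).1
        have hub : ∀ y ∈ List.filter (fun v => decide (v ≤ target)) l, y ≤ m :=
          fun y hy => PySem.List.max?_isMax hCmax y hy
        obtain ⟨i, hi⟩ : ∃ i, PySem.List.index? l m = some i := by
          cases h : PySem.List.index? l m with
          | none => exact absurd ((PySem.List.index?_eq_none_iff l m).1 h) (by simpa using hml)
          | some i => exact ⟨i, rfl⟩
        by_cases hlt : m < x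
        · have hxnot : x ∉ l := by
            intro hmem
            have : x ∈ List.filter (fun v => decide (v ≤ target)) l :=
              List.mem_filter.2 ⟨hmem, by simpa using hx⟩
            exact absurd (hub x this) (by omega)
          have hA := PySem.List.index?_append_singleton_self l x hxnot
          simp only [PySem.List.index?_eq_idxOf?] at hA hi ⊢
          simp [PySem.List.enumerate, pvStepA, pvMaxStep, hx, hlt, hA, hi]
        · have hA := PySem.List.index?_append_of_mem (l := l) [x] hml
          simp only [PySem.List.index?_eq_idxOf?] at hA hi ⊢
          simp [PySem.List.enumerate, pvStepA, pvMaxStep, hx, hlt, hA, hi]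
    · simp only [hx, decide_false]
      cases hC : (List.filter (fun v => decide (v ≤ target)) l).foldl pvMaxStep none with
      | none =>
        simp [PySem.List.enumerate, pvStepA, hx, hC]
      | some m =>
        have hCmax : PySem.List.max? (List.filter (fun v => decide (v ≤ target)) l) (fun v => v) = some m := by
          rw [pvMax?_eq_foldl, hC]
        have hml : m ∈ l := (List.mem_filter.1 (PySem.List.max?_mem hCmax)).1
        have hA := PySem.List.index?_append_of_mem (l := l) [x] hml
        simp only [PySem.List.index?_eq_idxOf?] at hA ⊢
        simp [PySem.List.enumerate, pvStepA, hx, hA, hC]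

-- ===== VERDICT (by name: the statement is the Claim_ definition above) =====
theorem find_max_leq_spec : Claim_equal_find_max_leq := by
  intro target nums _
  exact pvMain target nums
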